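-- pv_equiv track=rewrite | github.com/namonroyr/Proyecto-Criptograf-a | grafo2.py | graph2
-- ===== SOURCE A (Python) =====
-- def graph2(x,y,n):
--   if n == 0:
--     return {((x,y),(x+1,y))}
--   else:
--     last = graph2(x,y,n-1)
--     borde = set([segmento for segmento in last if segmento[1][0] == n])
--     minimo = min([i[1][1] for i in borde])
--     temp = set()
--     for segmento in borde:
--       head = segmento[0]
--       tail = segmento[1]
--       pendiente = tail[1] - head[1]
--       if n%2 == 1 or tail[1] > minimo:
--         temp.add((tail, (tail[0]+1,tail[1])))
--       temp.add((tail, (tail[0]+1,tail[1]+pendiente+1)))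
--   return last.union(temp)
-- ===== SOURCE B (Python) =====
-- def graph2(x, y, n):
--     # Iterative level loop carrying the current frontier (last level's new
--     # segments) forward instead of re-filtering the whole accumulated set.
--     if n < 0:
--         raise ValueError("n must be non-negative")  # A's recursion never returns here
--     acc = {((x, y), (x + 1, y))}
--     frontier = acc
--     for level in range(1, n + 1):
--         borde = {s for s in frontier if s[1][0] == level}
--         minimo = min(s[1][1] for s in borde)
--         temp = set()
--         for s in borde:
--             tail = s[1]
--             if level % 2 == 1 or tail[1] > minimo:
--                 temp.add((tail, (tail[0] + 1, tail[1])))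
--             temp.add((tail, (tail[0] + 1, tail[1] + (tail[1] - s[0][1]) + 1)))
--         acc = acc | temp
--         frontier = temp
--     return acc
-- ===== Notes on version B (the rewrite author's own statement) =====
-- stated objective: alternative
-- what changed: Replaces A's linear recursion, which re-filters the entire accumulated segment set at every level, by an iterative loop that carries the current frontier (last level's new segments) forward and filters only it.
import Mathlib
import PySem

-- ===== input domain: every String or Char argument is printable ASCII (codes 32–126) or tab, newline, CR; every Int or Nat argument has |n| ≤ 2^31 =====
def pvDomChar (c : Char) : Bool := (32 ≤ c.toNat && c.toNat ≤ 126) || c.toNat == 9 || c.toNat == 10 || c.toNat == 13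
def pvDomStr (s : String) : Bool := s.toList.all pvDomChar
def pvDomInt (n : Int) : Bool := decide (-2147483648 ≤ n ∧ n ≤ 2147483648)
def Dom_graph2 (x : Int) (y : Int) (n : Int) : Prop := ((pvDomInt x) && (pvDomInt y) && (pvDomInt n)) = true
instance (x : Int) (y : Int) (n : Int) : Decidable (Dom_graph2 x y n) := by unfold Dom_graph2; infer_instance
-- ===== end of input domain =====

-- B replaces A's linear recursion by an iterative level loop that carries the frontier
-- (the previous level's new segments) forward, filtering only it instead of the whole set.

-- ===== PORT A =====
-- One recursion level of A (the `else` branch).  Where Python's `min([])` raises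
-- ValueError (excluded by Pre_graph2) the port returns [].
def graph2Level (lvl : Int) (last : List ((Int × Int) × (Int × Int))) :
    List ((Int × Int) × (Int × Int)) :=
  let borde := PySem.Set.ofList (last.filter (fun segmento => segmento.2.1 == lvl))
  match PySem.List.min? (borde.map (fun i => i.2.2)) (fun v => v) with
  | none => []
  | some minimo =>
    let temp := borde.foldl (fun t segmento =>
      let head := segmento.1
      let tail := segmento.2
      let pendiente := tail.2 - head.2
      let t := if PySem.Int.mod lvl 2 == 1 || decide (tail.2 > minimo)
               then PySem.Set.add t (tail, (tail.1 + 1, tail.2))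
               else t
      PySem.Set.add t (tail, (tail.1 + 1, tail.2 + pendiente + 1))) PySem.Set.empty
    PySem.Set.union last temp

-- A recurses on n; for n < 0 the Python recursion never returns (RecursionError,
-- excluded by Pre_graph2), so the port recurses on n.toNat.
def graph2Rec (x y : Int) : Nat → List ((Int × Int) × (Int × Int))
  | 0 => PySem.Set.ofList [((x, y), (x + 1, y))]
  | k + 1 => graph2Level ((k : Int) + 1) (graph2Rec x y k)

def graph2 (x : Int) (y : Int) (n : Int) : List ((Int × Int) × (Int × Int)) :=
  graph2Rec x y n.toNat

-- ===== PORT B =====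
-- One iteration of B's level loop on the state (acc, frontier).  Where Python's
-- `min([])` raises ValueError (excluded by Pre_graph2) the port returns ([], []).
def graph2AltStep (lvl : Int)
    (st : List ((Int × Int) × (Int × Int)) × List ((Int × Int) × (Int × Int))) :
    List ((Int × Int) × (Int × Int)) × List ((Int × Int) × (Int × Int)) :=
  let borde := PySem.Set.ofList (st.2.filter (fun s => s.2.1 == lvl))
  match PySem.List.min? (borde.map (fun s => s.2.2)) (fun v => v) with
  | none => ([], [])
  | some minimo =>
    let temp := borde.foldl (fun t s =>
      let tail := s.2
      let t := if PySem.Int.mod lvl 2 == 1 || decide (tail.2 > minimo)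
               then PySem.Set.add t (tail, (tail.1 + 1, tail.2))
               else t
      PySem.Set.add t (tail, (tail.1 + 1, tail.2 + (tail.2 - s.1.2) + 1))) PySem.Set.empty
    (PySem.Set.union st.1 temp, temp)

-- B's `raise ValueError` guard on n < 0 (where A's recursion never returns, both
-- excluded by Pre_graph2) is rendered as returning [].
def graph2_alt (x : Int) (y : Int) (n : Int) : List ((Int × Int) × (Int × Int)) :=
  if n < 0 then []
  else
    ((PySem.List.pyRange 1 (n + 1)).foldl (fun st lvl => graph2AltStep lvl st)
      (PySem.Set.ofList [((x, y), (x + 1, y))], PySem.Set.ofList [((x, y), (x + 1, y))])).1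

-- ===== PRECONDITION & SPEC =====
-- Pre_ excludes exactly the inputs on which A raises: n < 0 (unbounded recursion,
-- RecursionError) and n ≥ 1 with x ≠ 0 (borde filters on absolute x-coordinate == level,
-- so it is empty at level 1 and min([]) raises ValueError).
def Pre_graph2 (x : Int) (y : Int) (n : Int) : Prop := 0 ≤ n ∧ (n = 0 ∨ x = 0)
instance (x : Int) (y : Int) (n : Int) : Decidable (Pre_graph2 x y n) := by
  unfold Pre_graph2; infer_instance

def pvWitness_graph2 : Int × Int × Int := (0, 5, 3)

def Spec_graph2 (x : Int) (y : Int) (n : Int) (out : List ((Int × Int) × (Int × Int))) : Prop := out = graph2_alt x y n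
instance (x : Int) (y : Int) (n : Int) (out : List ((Int × Int) × (Int × Int))) : Decidable (Spec_graph2 x y n out) := by unfold Spec_graph2; infer_instance

-- ===== CLAIM (what is proved, stated in full; the proofs are below) =====
def Claim_equal_graph2 : Prop := ∀ (x : Int) (y : Int) (n : Int), Dom_graph2 x y n → Pre_graph2 x y n → Spec_graph2 x y n (graph2 x y n)

-- ===== LEMMAS AND PROOFS =====

lemma set_add_ne_nil {α : Type} [BEq α] (s : List α) (x : α) : PySem.Set.add s x ≠ [] := by
  unfold PySem.Set.add
  split
  · intro h
    subst h
    simp [PySem.Set.contains] at *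
  · simp

lemma inner_fold_ne_nil (lvl minimo : Int)
    (l t : List ((Int × Int) × (Int × Int))) (h : t ≠ [] ∨ l ≠ []) :
    l.foldl (fun t s =>
      let tail := s.2
      let t := if PySem.Int.mod lvl 2 == 1 || decide (tail.2 > minimo)
               then PySem.Set.add t (tail, (tail.1 + 1, tail.2))
               else t
      PySem.Set.add t (tail, (tail.1 + 1, tail.2 + (tail.2 - s.1.2) + 1))) t ≠ [] := by
  induction l generalizing t with
  | nil => simpa using h.resolve_right (by simp)
  | cons a l ih =>
    simp only [List.foldl_cons]
    exact ih _ (Or.inl (set_add_ne_nil _ _))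

lemma inner_fold_props (lvl minimo : Int)
    (l t : List ((Int × Int) × (Int × Int)))
    (hl : ∀ s ∈ l, s.2.1 = lvl) (ht : ∀ u ∈ t, u.2.1 = lvl + 1) (hnd : t.Nodup) :
    (l.foldl (fun t s =>
      let tail := s.2
      let t := if PySem.Int.mod lvl 2 == 1 || decide (tail.2 > minimo)
               then PySem.Set.add t (tail, (tail.1 + 1, tail.2))
               else t
      PySem.Set.add t (tail, (tail.1 + 1, tail.2 + (tail.2 - s.1.2) + 1))) t).Nodup ∧
    ∀ u ∈ (l.foldl (fun t s =>
      let tail := s.2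
      let t := if PySem.Int.mod lvl 2 == 1 || decide (tail.2 > minimo)
               then PySem.Set.add t (tail, (tail.1 + 1, tail.2))
               else t
      PySem.Set.add t (tail, (tail.1 + 1, tail.2 + (tail.2 - s.1.2) + 1))) t),
      u.2.1 = lvl + 1 := by
  induction l generalizing t with
  | nil => exact ⟨hnd, ht⟩
  | cons a l ih =>
    simp only [List.foldl_cons]
    have ha : a.2.1 = lvl := hl a List.mem_cons_self
    refine ih _ (fun s hs => hl s (List.mem_cons_of_mem _ hs)) ?_ ?_
    · intro u hu
      rcases (PySem.Set.mem_add _ _ _).1 hu with hu' | hu'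
      · split at hu'
        · rcases (PySem.Set.mem_add _ _ _).1 hu' with h2 | h2
          · exact ht u h2
          · subst h2; simp; omega
        · exact ht u hu'
      · subst hu'; simp; omega
    · apply PySem.Set.nodup_add
      split
      · exact PySem.Set.nodup_add _ _ hnd
      · exact hnd

lemma step_eq (lvl : Int) (acc frontier : List ((Int × Int) × (Int × Int)))
    (hnd : acc.Nodup)
    (hf : frontier = acc.filter (fun s => s.2.1 == lvl))
    (hne : frontier ≠ [])
    (hbound : ∀ s ∈ acc, s.2.1 ≤ lvl) :
    ∃ temp : List ((Int × Int) × (Int × Int)),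
      graph2Level lvl acc = acc ++ temp ∧
      graph2AltStep lvl (acc, frontier) = (acc ++ temp, temp) ∧
      temp ≠ [] ∧ temp.Nodup ∧ (∀ u ∈ temp, u.2.1 = lvl + 1) := by
  have hfmem : ∀ s ∈ frontier, s.2.1 = lvl := by
    intro s hs
    rw [hf] at hs
    simpa using (List.of_mem_filter hs)
  have hofl : PySem.Set.ofList (acc.filter (fun s => s.2.1 == lvl)) = frontier := by
    rw [← hf]
    exact PySem.Set.ofList_eq_self_of_nodup _ (hf ▸ hnd.filter _)
  have hfront : PySem.Set.ofList (frontier.filter (fun s => s.2.1 == lvl)) = frontier := by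
    rw [List.filter_eq_self.2 (fun a ha => by simpa using hfmem a ha)]
    exact PySem.Set.ofList_eq_self_of_nodup _ (hf ▸ hnd.filter _)
  obtain ⟨minimo, hmin⟩ :
      ∃ m, PySem.List.min? (frontier.map (fun i => i.2.2)) (fun v => v) = some m := by
    cases h : PySem.List.min? (frontier.map (fun i => i.2.2)) (fun v => v) with
    | none => exact absurd (by simpa using (PySem.List.min?_eq_none_iff _ _).1 h) hne
    | some m => exact ⟨m, rfl⟩
  have hprops := inner_fold_props lvl minimo frontier PySem.Set.empty hfmem
      (by simp [PySem.Set.empty]) (by simp [PySem.Set.empty])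
  have hdisj : ∀ u ∈ frontier.foldl (fun t s =>
      let tail := s.2
      let t := if PySem.Int.mod lvl 2 == 1 || decide (tail.2 > minimo)
               then PySem.Set.add t (tail, (tail.1 + 1, tail.2))
               else t
      PySem.Set.add t (tail, (tail.1 + 1, tail.2 + (tail.2 - s.1.2) + 1))) PySem.Set.empty,
      u ∉ acc := by
    intro u hu hmem
    have h1 := hprops.2 u hu
    have h2 := hbound u hmem
    omega
  refine ⟨frontier.foldl (fun t s =>
      let tail := s.2
      let t := if PySem.Int.mod lvl 2 == 1 || decide (tail.2 > minimo)
               then PySem.Set.add t (tail, (tail.1 + 1, tail.2))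
               else t
      PySem.Set.add t (tail, (tail.1 + 1, tail.2 + (tail.2 - s.1.2) + 1))) PySem.Set.empty,
      ?_, ?_, inner_fold_ne_nil _ _ _ _ (Or.inr hne), hprops.1, hprops.2⟩
  · show graph2Level lvl acc = _
    simp only [graph2Level, hofl, hmin]
    exact PySem.Set.update_eq_append_of_disjoint _ _ hprops.1 hdisj
  · show graph2AltStep lvl (acc, frontier) = _
    simp only [graph2AltStep, hfront, hmin]
    refine Prod.ext ?_ rfl
    exact PySem.Set.update_eq_append_of_disjoint _ _ hprops.1 hdisj

-- The loop invariant for x = 0: after k levels B's state is (A's set after k levels,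
-- its frontier = the segments whose tail x-coordinate is k + 1).
lemma graph2_inv (y : Int) (k : Nat) :
    (PySem.List.pyRange 1 ((k : Int) + 1)).foldl (fun st lvl => graph2AltStep lvl st)
        (PySem.Set.ofList [((0, y), (0 + 1, y))], PySem.Set.ofList [((0, y), (0 + 1, y))]) =
      (graph2Rec 0 y k, (graph2Rec 0 y k).filter (fun s => s.2.1 == (k : Int) + 1)) ∧
    (graph2Rec 0 y k).Nodup ∧
    (graph2Rec 0 y k).filter (fun s => s.2.1 == (k : Int) + 1) ≠ [] ∧
    (∀ s ∈ graph2Rec 0 y k, s.2.1 ≤ (k : Int) + 1) := by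
  induction k with
  | zero =>
    refine ⟨?_, ?_, ?_, ?_⟩
    · have h1 : PySem.List.pyRange 1 ((0 : Int) + 1) = [] := by decide
      simp only [Nat.cast_zero, h1, List.foldl_nil, graph2Rec]
      refine Prod.ext rfl ?_
      simp [PySem.Set.ofList, PySem.Set.add, PySem.Set.empty, PySem.Set.contains]
    · simp [graph2Rec, PySem.Set.ofList, PySem.Set.add, PySem.Set.empty, PySem.Set.contains]
    · simp [graph2Rec, PySem.Set.ofList, PySem.Set.add, PySem.Set.empty, PySem.Set.contains]
    · simp [graph2Rec, PySem.Set.ofList, PySem.Set.add, PySem.Set.empty, PySem.Set.contains]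
  | succ k ih =>
    obtain ⟨hst, hnd, hne, hbound⟩ := ih
    have hrange : PySem.List.pyRange 1 (((k + 1 : Nat) : Int) + 1) =
        PySem.List.pyRange 1 ((k : Int) + 1) ++ [(k : Int) + 1] := by
      have heq : (((k + 1 : Nat) : Int) + 1) = ((k : Int) + 1) + 1 := by push_cast; ring
      rw [heq]
      exact PySem.List.pyRange_one_succ_right (by omega)
    obtain ⟨temp, hA, hB, htne, htnd, htlvl⟩ :=
      step_eq ((k : Int) + 1) (graph2Rec 0 y k)
        ((graph2Rec 0 y k).filter (fun s => s.2.1 == (k : Int) + 1)) hnd rfl hne hbound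
    have hAk1 : graph2Rec 0 y (k + 1) = graph2Rec 0 y k ++ temp := hA
    have hfiltacc : (graph2Rec 0 y k).filter (fun s => s.2.1 == ((k + 1 : Nat) : Int) + 1) = [] := by
      rw [List.filter_eq_nil_iff]
      intro a ha
      have := hbound a ha
      simp only [beq_iff_eq]
      push_cast
      omega
    have hfilttemp : temp.filter (fun s => s.2.1 == ((k + 1 : Nat) : Int) + 1) = temp := by
      rw [List.filter_eq_self]
      intro a ha
      have := htlvl a ha
      simp only [beq_iff_eq]
      push_cast
      omega
    have hfilt : (graph2Rec 0 y (k + 1)).filter (fun s => s.2.1 == ((k + 1 : Nat) : Int) + 1)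
        = temp := by
      rw [hAk1, List.filter_append, hfiltacc, hfilttemp, List.nil_append]
    refine ⟨?_, ?_, ?_, ?_⟩
    · rw [hrange, List.foldl_append, hst, List.foldl_cons, List.foldl_nil, hB, hfilt, ← hAk1]
    · rw [hAk1]
      refine hnd.append htnd ?_
      intro a ha hta
      have h1 := hbound a ha
      have h2 := htlvl a hta
      omega
    · rw [hfilt]; exact htne
    · rw [hAk1]
      intro s hs
      rcases List.mem_append.1 hs with h | h
      · have := hbound s h; push_cast; omega
      · have := htlvl s h; push_cast; omega

-- ===== VERDICT (by name: the statement is the Claim_ definition above) =====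
theorem graph2_spec : Claim_equal_graph2 := by
  intro x y n _ hpre
  obtain ⟨hn, hx⟩ := hpre
  unfold Spec_graph2
  rcases hx with hx | hx
  · subst hx
    have h1 : PySem.List.pyRange 1 ((0 : Int) + 1) = [] := by decide
    unfold graph2 graph2_alt
    rw [if_neg (by omega), h1]
    rfl
  · subst hx
    have hk : ((n.toNat : Int)) = n := Int.toNat_of_nonneg hn
    have hI := (graph2_inv y n.toNat).1
    unfold graph2 graph2_alt
    rw [if_neg (by omega), ← hk, hI, Int.toNat_natCast]
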